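-- pv_equiv track=rewrite | github.com/1160300506/trubo_hom | turbo_hom/demo.py | DetermineMatchingOrder
-- ===== SOURCE A (Python) =====
-- def DetermineMatchingOrder(start_vertex, CR_M_):
--     order_dic = {}
--     order_ = [start_vertex]
--     for dic in CR_M_:
--         if dic != start_vertex:
--             order_dic[dic] = len(CR_M_[dic])
--     order_ = order_ + sorted(order_dic, key=order_dic.__getitem__)
--     return order_
-- ===== SOURCE B (Python) =====
-- def DetermineMatchingOrder(start_vertex, CR_M_):
--     buckets = {}
--     for v in CR_M_:
--         if v != start_vertex:
--             buckets.setdefault(len(CR_M_[v]), []).append(v)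
--     order_ = [start_vertex]
--     for size in sorted(buckets):
--         order_.extend(buckets[size])
--     return order_
-- ===== Notes on version B (the rewrite author's own statement) =====
-- stated objective: alternative
-- what changed: Replaces the comparison sort of all non-start vertices keyed by candidate-set size with a single grouping pass into size-indexed buckets (preserving dict order within each bucket) followed by emitting the buckets in ascending size order.
import Mathlib
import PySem

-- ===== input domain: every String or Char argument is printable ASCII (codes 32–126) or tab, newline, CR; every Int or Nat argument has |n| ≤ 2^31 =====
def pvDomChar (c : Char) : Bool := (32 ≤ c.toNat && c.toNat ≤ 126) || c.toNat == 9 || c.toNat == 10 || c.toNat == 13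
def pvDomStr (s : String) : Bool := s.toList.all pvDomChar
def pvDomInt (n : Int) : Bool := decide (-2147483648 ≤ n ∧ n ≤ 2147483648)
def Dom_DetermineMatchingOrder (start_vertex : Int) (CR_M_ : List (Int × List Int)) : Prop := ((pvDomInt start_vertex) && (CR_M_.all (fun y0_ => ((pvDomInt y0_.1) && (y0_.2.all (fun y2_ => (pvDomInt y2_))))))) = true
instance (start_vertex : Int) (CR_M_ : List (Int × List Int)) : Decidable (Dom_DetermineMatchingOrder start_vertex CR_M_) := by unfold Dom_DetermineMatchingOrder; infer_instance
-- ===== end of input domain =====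

-- B replaces A's comparison sort of the vertices (stable sort keyed by candidate-set size)
-- by a bucket pass: group vertices by size in one dict sweep, then emit the buckets in
-- ascending size order (objective: alternative decomposition; ties agree by stability).

-- ===== PORT A =====
def DetermineMatchingOrder (start_vertex : Int) (CR_M_ : List (Int × List Int)) : List Int :=
  let d := PySem.Dict.ofList CR_M_
  let order_dic := d.keys.foldl (fun od k =>
      if k ≠ start_vertex then od.insert k ((d.getD k []).length : Int) else od) PySem.Dict.empty
  let order_ : List Int := [start_vertex]
  order_ ++ PySem.List.sorted order_dic.keys (fun k => order_dic.getD k 0) false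

-- ===== PORT B =====
def DetermineMatchingOrder_alt (start_vertex : Int) (CR_M_ : List (Int × List Int)) : List Int :=
  let d := PySem.Dict.ofList CR_M_
  let buckets := d.keys.foldl (fun b v =>
      if v ≠ start_vertex then b.modify ((d.getD v []).length : Int) [] (· ++ [v]) else b)
    PySem.Dict.empty
  (PySem.List.sorted buckets.keys (fun L => L) false).foldl
    (fun acc L => acc ++ buckets.getD L []) [start_vertex]

-- ===== PRECONDITION & SPEC =====
def Spec_DetermineMatchingOrder (start_vertex : Int) (CR_M_ : List (Int × List Int)) (out : List Int) : Prop := out = DetermineMatchingOrder_alt start_vertex CR_M_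
instance (start_vertex : Int) (CR_M_ : List (Int × List Int)) (out : List Int) : Decidable (Spec_DetermineMatchingOrder start_vertex CR_M_ out) := by unfold Spec_DetermineMatchingOrder; infer_instance

-- ===== CLAIM (what is proved, stated in full; the proofs are below) =====
def Claim_equal_DetermineMatchingOrder : Prop := ∀ (start_vertex : Int) (CR_M_ : List (Int × List Int)), Dom_DetermineMatchingOrder start_vertex CR_M_ → Spec_DetermineMatchingOrder start_vertex CR_M_ (DetermineMatchingOrder start_vertex CR_M_)

-- ===== LEMMAS AND PROOFS =====

theorem pv_insertBy_nil {α : Type} (before : α → α → Bool) (x : α) :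
    PySem.List.insertBy before x [] = [x] := rfl

theorem pv_insertBy_cons {α : Type} (before : α → α → Bool) (x y : α) (ys : List α) :
    PySem.List.insertBy before x (y :: ys) =
      if before x y then x :: y :: ys else y :: PySem.List.insertBy before x ys := by
  simp [PySem.List.insertBy]

-- unfolding one step of the insertion sort from the right
theorem pv_sorted_append_singleton {α : Type} (key : α → Int) (xs : List α) (x : α) :
    PySem.List.sorted (xs ++ [x]) key false =
      PySem.List.insertBy (fun a b => decide (key a < key b)) x (PySem.List.sorted xs key false) := by
  rw [PySem.List.sorted_eq_foldl_insertBy, PySem.List.sorted_eq_foldl_insertBy,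
      List.foldl_append, List.foldl_cons, List.foldl_nil]

-- insert past a prefix none of whose elements x goes before
theorem pv_insertBy_append {α : Type} (before : α → α → Bool) (x : α) (A B : List α)
    (h : ∀ a ∈ A, before x a = false) :
    PySem.List.insertBy before x (A ++ B) = A ++ PySem.List.insertBy before x B := by
  induction A with
  | nil => simp
  | cons a A ih =>
      have ha := h a (by simp)
      simp only [List.cons_append, pv_insertBy_cons, ha, Bool.false_eq_true, if_false]
      rw [ih (fun a' ha' => h a' (by simp [ha']))]

theorem pv_insertBy_all_before {α : Type} (before : α → α → Bool) (x : α) (B : List α)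
    (h : ∀ b ∈ B, before x b = true) :
    PySem.List.insertBy before x B = x :: B := by
  cases B with
  | nil => exact pv_insertBy_nil before x
  | cons b B => rw [pv_insertBy_cons, h b (by simp)]; simp

theorem pv_insertBy_congr {α : Type} (b1 b2 : α → α → Bool) (x : α) (ys : List α)
    (h : ∀ y ∈ ys, b1 x y = b2 x y) :
    PySem.List.insertBy b1 x ys = PySem.List.insertBy b2 x ys := by
  induction ys with
  | nil => rw [pv_insertBy_nil, pv_insertBy_nil]
  | cons y ys ih =>
      rw [pv_insertBy_cons, pv_insertBy_cons, h y (by simp),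
          ih (fun y' hy' => h y' (by simp [hy']))]

-- the sort only looks at the key's values on the list
theorem pv_sorted_congr {α : Type} (k1 k2 : α → Int) (xs : List α)
    (h : ∀ y ∈ xs, k1 y = k2 y) :
    PySem.List.sorted xs k1 false = PySem.List.sorted xs k2 false := by
  induction xs using List.reverseRecOn with
  | nil => rfl
  | append_singleton xs x ih =>
      rw [pv_sorted_append_singleton, pv_sorted_append_singleton,
          ih (fun y hy => h y (by simp [hy]))]
      apply pv_insertBy_congr
      intro y hy
      have hyx : y ∈ xs := (PySem.List.mem_sorted _ _ _ _).mp hy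
      rw [h x (by simp), h y (by simp [hyx])]

-- flattening ignores an inserted empty bucket key
theorem pv_flatMap_insertBy {α β : Type} (before : α → α → Bool) (a : α) (ys : List α)
    (f : α → List β) (hfa : f a = []) :
    (PySem.List.insertBy before a ys).flatMap f = ys.flatMap f := by
  induction ys with
  | nil => simp [pv_insertBy_nil, hfa]
  | cons y ys ih =>
      rw [pv_insertBy_cons]
      by_cases h : before a y
      · simp [h, hfa]
      · simp only [h, Bool.false_eq_true, if_false, List.flatMap_cons, ih]

theorem pv_flatMap_congr {α β : Type} (f g : α → List β) (l : List α)
    (h : ∀ a ∈ l, f a = g a) : l.flatMap f = l.flatMap g := by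
  induction l with
  | nil => rfl
  | cons a l ih =>
      simp only [List.flatMap_cons, h a (by simp), ih (fun a' ha' => h a' (by simp [ha']))]

-- inserting x into the flattened buckets = appending x to its own bucket
theorem pv_insertBy_flatMap {α : Type} (key : α → Int) (x : α) (D : List Int)
    (hD : D.Pairwise (· < ·)) (f : Int → List α)
    (hf : ∀ L, ∀ y ∈ f L, key y = L) (hmem : key x ∈ D) :
    PySem.List.insertBy (fun a b => decide (key a < key b)) x (D.flatMap f)
      = D.flatMap (fun L => f L ++ if key x == L then [x] else []) := by
  induction D with
  | nil => simp at hmem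
  | cons L D ih =>
      rcases List.pairwise_cons.mp hD with ⟨hLlt, hD'⟩
      by_cases hx : key x = L
      · -- x belongs to the head bucket
        have h1 : ∀ a ∈ f L, (decide (key x < key a)) = false := by
          intro a ha
          have := hf L a ha
          simp [this, hx]
        rw [List.flatMap_cons, pv_insertBy_append _ _ _ _ h1,
            pv_insertBy_all_before _ _ _ (by
              intro b hb
              rcases List.mem_flatMap.mp hb with ⟨L', hL', hb'⟩
              have hb2 := hf L' b hb'
              have hb3 := hLlt L' hL'
              simp [hb2, hx]
              omega)]
        have hD2 : D.flatMap (fun L' => f L' ++ if key x == L' then [x] else [])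
            = D.flatMap f := by
          apply pv_flatMap_congr
          intro L' hL'
          have hne : key x ≠ L' := by have := hLlt L' hL'; omega
          simp [hne]
        rw [List.flatMap_cons, hD2, hx]
        simp
      · -- x belongs to a deeper bucket
        have hxD : key x ∈ D := by
          rcases List.mem_cons.mp hmem with h | h
          · exact absurd h hx
          · exact h
        have h1 : ∀ a ∈ f L, (decide (key x < key a)) = false := by
          intro a ha
          have ha2 := hf L a ha
          have : L < key x := hLlt _ hxD
          simp [ha2]; omega
        rw [List.flatMap_cons, pv_insertBy_append _ _ _ _ h1, ih hD' hxD,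
            List.flatMap_cons]
        have : (key x == L) = false := by simp [hx]
        simp [this]

-- the crux: a stable sort by an Int key is the buckets emitted in increasing key order
theorem pv_sorted_buckets {α : Type} (key : α → Int) (xs : List α) :
    PySem.List.sorted xs key false
      = (PySem.List.sorted (PySem.Set.ofList (xs.map key)) (fun L => L) false).flatMap
          (fun L => xs.filter (fun y => key y == L)) := by
  induction xs using List.reverseRecOn with
  | nil => rfl
  | append_singleton xs x ih =>
      have hmapp : (xs ++ [x]).map key = xs.map key ++ [key x] := by simp
      have hofl : PySem.Set.ofList ((xs ++ [x]).map key)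
          = PySem.Set.add (PySem.Set.ofList (xs.map key)) (key x) := by
        rw [hmapp, PySem.Set.ofList_append_singleton]
      have hD'pair : (PySem.List.sorted (PySem.Set.ofList ((xs ++ [x]).map key)) (fun L => L) false).Pairwise (· < ·) :=
        PySem.List.sorted_ofList_pairwise_lt _
      have hmem : key x ∈ PySem.List.sorted (PySem.Set.ofList ((xs ++ [x]).map key)) (fun L => L) false := by
        rw [PySem.List.mem_sorted, PySem.Set.mem_ofList]
        exact List.mem_map_of_mem (by simp)
      have hf : ∀ L, ∀ y ∈ xs.filter (fun y => key y == L), key y = L := by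
        intro L y hy
        have := (List.mem_filter.mp hy).2
        simpa using this
      -- bridge: the old buckets flatten the same over the new key list
      have hbridge : (PySem.List.sorted (PySem.Set.ofList (xs.map key)) (fun L => L) false).flatMap
            (fun L => xs.filter (fun y => key y == L))
          = (PySem.List.sorted (PySem.Set.ofList ((xs ++ [x]).map key)) (fun L => L) false).flatMap
            (fun L => xs.filter (fun y => key y == L)) := by
        by_cases hcase : key x ∈ xs.map key
        · have heq : PySem.Set.ofList ((xs ++ [x]).map key) = PySem.Set.ofList (xs.map key) := by
            have hc : PySem.Set.contains (PySem.Set.ofList (xs.map key)) (key x) = true :=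
              (PySem.Set.contains_iff _ _).mpr ((PySem.Set.mem_ofList _ _).mpr hcase)
            rw [hofl]
            simp only [PySem.Set.add, hc, if_true]
          rw [heq]
        · have hofl2 : PySem.Set.ofList ((xs ++ [x]).map key)
              = PySem.Set.ofList (xs.map key) ++ [key x] := by
            have hc : PySem.Set.contains (PySem.Set.ofList (xs.map key)) (key x) = false := by
              rw [Bool.eq_false_iff]
              intro hc
              exact hcase ((PySem.Set.mem_ofList _ _).mp ((PySem.Set.contains_iff _ _).mp hc))
            rw [hofl]
            simp only [PySem.Set.add, hc, Bool.false_eq_true, if_false]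
          have hins : PySem.List.sorted (PySem.Set.ofList ((xs ++ [x]).map key)) (fun L => L) false
              = PySem.List.insertBy (fun a b => decide (a < b)) (key x)
                  (PySem.List.sorted (PySem.Set.ofList (xs.map key)) (fun L => L) false) := by
            rw [hofl2]
            exact pv_sorted_append_singleton (fun L => L) _ (key x)
          -- the new key's bucket over xs is empty, so it may be inserted freely
          rw [hins, pv_flatMap_insertBy _ _ _ _ (by
            show List.filter (fun y => key y == key x) xs = []
            rw [List.filter_eq_nil_iff]
            intro y hy hbeq
            apply hcase
            have hkey : key y = key x := by simpa using hbeq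
            rw [← hkey]
            exact List.mem_map_of_mem hy)]
      calc PySem.List.sorted (xs ++ [x]) key false
          = PySem.List.insertBy (fun a b => decide (key a < key b)) x
              (PySem.List.sorted xs key false) := pv_sorted_append_singleton key xs x
        _ = (PySem.List.sorted (PySem.Set.ofList ((xs ++ [x]).map key)) (fun L => L) false).flatMap
              (fun L => (xs ++ [x]).filter (fun y => key y == L)) := by
            rw [ih, hbridge, pv_insertBy_flatMap key x _ hD'pair _ hf hmem]
            apply pv_flatMap_congr
            intro L _
            rw [List.filter_append]
            simp only [List.filter_cons, List.filter_nil]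

-- getD after a fold of inserts with values independent of the accumulator
theorem pv_getD_foldl_insert (g : Int → Int) (ks : List Int) (d : PySem.Dict Int Int) (k : Int) :
    (ks.foldl (fun od k' => od.insert k' (g k')) d).getD k 0
      = if k ∈ ks then g k else d.getD k 0 := by
  induction ks generalizing d with
  | nil => simp
  | cons k0 ks ih =>
      rw [List.foldl_cons, ih]
      by_cases hk : k ∈ ks
      · simp [hk]
      · by_cases he : k = k0
        · subst he; simp [hk, PySem.Dict.getD_insert_self]
        · simp [hk, he, PySem.Dict.getD_insert_of_ne]

-- ===== VERDICT (by name: the statement is the Claim_ definition above) =====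
theorem DetermineMatchingOrder_spec : Claim_equal_DetermineMatchingOrder := by
  intro s crm _
  unfold Spec_DetermineMatchingOrder DetermineMatchingOrder DetermineMatchingOrder_alt
  simp only []
  set d := PySem.Dict.ofList crm with hd
  set len : Int → Int := fun k => ((d.getD k []).length : Int) with hlen
  set F : List Int := d.keys.filter (fun k => decide (k ≠ s)) with hF
  have hFnodup : F.Nodup := (PySem.Dict.nodup_keys_ofList crm).filter _
  -- A side
  have hAfold : d.keys.foldl (fun od k => if k ≠ s then od.insert k (len k) else od) PySem.Dict.empty
      = F.foldl (fun od k => od.insert k (len k)) PySem.Dict.empty := by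
    rw [PySem.List.foldl_ite_eq_foldl_filter]
  have hAkeys : (F.foldl (fun od k => od.insert k (len k)) PySem.Dict.empty).keys = F := by
    rw [PySem.Dict.keys_foldl_insert]
    simp [PySem.Set.update_nil_left, PySem.Set.ofList_eq_self_of_nodup _ hFnodup]
  -- B side
  have hBfold : d.keys.foldl (fun b v => if v ≠ s then b.modify (len v) [] (· ++ [v]) else b) PySem.Dict.empty
      = F.foldl (fun b v => b.modify (len v) [] (· ++ [v])) PySem.Dict.empty := by
    rw [PySem.List.foldl_ite_eq_foldl_filter]
  set bk := F.foldl (fun b v => b.modify (len v) [] (· ++ [v])) PySem.Dict.empty with hbk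
  have hBkeys : bk.keys = PySem.Set.ofList (F.map len) := by
    rw [hbk, PySem.Dict.keys_foldl_modify_key]
    simp [PySem.Set.update_nil_left]
  have hBgetD : ∀ L, bk.getD L [] = F.filter (fun y => len y == L) := by
    intro L
    have hfold2 : F.foldl (fun b v => b.modify (len v) [] (· ++ [v])) PySem.Dict.empty
        = (F.map (fun v => (len v, v))).foldl (fun b p => b.modify p.1 [] (· ++ [p.2]))
            PySem.Dict.empty := by
      rw [List.foldl_map]
    rw [hbk, hfold2, PySem.Dict.getD_foldl_modify_append]
    simp [List.filter_map, Function.comp_def]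
  rw [hAfold, hBfold, hAkeys, hBkeys, PySem.List.foldl_append_eq_flatMap]
  have hcong : PySem.List.sorted F (fun k => (F.foldl (fun od k => od.insert k (len k)) PySem.Dict.empty).getD k 0) false
      = PySem.List.sorted F len false := by
    apply pv_sorted_congr
    intro y hy
    rw [pv_getD_foldl_insert]
    simp [hy]
  rw [hcong, pv_sorted_buckets len F]
  congr 1
  apply pv_flatMap_congr
  intro L _
  rw [hBgetD L]
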